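-- pv_equiv track=rewrite | github.com/jsfischer343/MathHelperPrograms | MatrixFunctions.py | projection
-- ===== SOURCE A (Python) =====
-- import copy
--
-- def dotProduct(v1,v2):
--     m1 = len(v1)
--     n1 = len(v1[0])
--     m2 = len(v2)
--     n2 = len(v2[0])
--     dotProduct = 0
--     if(n1!=1 or n2!=1):
--         raise Exception("Not a vector")
--     elif(m1!=m2):
--         raise Exception("Vectors must be same size to compute dot product")
--     else:
--         for i in range(m1):
--             dotProduct += v1[i][0]*v2[i][0]
--         return dotProduct
--
-- def scaleVector(v,scaler):
--     q = copy.deepcopy(v)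
--     m = len(q)
--     n = len(q[0])
--     norm = 0
--     if(n!=1):
--         raise Exception("Not a vector")
--     else:
--         for i in range(m):
--             q[i][0] = q[i][0]*scaler
--         return q
--
-- def addVectors(v1,v2):
--     m1 = len(v1)
--     n1 = len(v1[0])
--     m2 = len(v2)
--     n2 = len(v2[0])
--     if(n1!=1 or n2!=1):
--         raise Exception("Not a vector")
--     elif(m1!=m2):
--         raise Exception("Vectors must be same size to add")
--     else:
--         v = [[0 for c in range(1)] for r in range(m1)]
--         for i in range(m1):
--             v[i][0] = v1[i][0]+v2[i][0]
--         return v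
--
-- def seperateColumnVector(M,columnIndex):
--     m = len(M)
--     n = len(M[0])
--     v = [[0 for c in range(1)] for r in range(m)]
--     for i in range(m):
--         v[i][0] = M[i][columnIndex]
--     return v
--
-- def projection(vector,orthanormalM):
--     #projection of vector onto the column space of M
--     m = len(orthanormalM)
--     n = len(orthanormalM[0])
--     if(m!=len(vector)):
--         raise Exception("Vector and span not in same space")
--     p = [[0 for c in range(1)] for r in range(m)]
--     q = [[0 for c in range(1)] for r in range(m)]
--     for i in range(n):
--         q = seperateColumnVector(orthanormalM,i)
--         p = addVectors(p,scaleVector(q,dotProduct(vector,q)))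
--     return p
-- ===== SOURCE B (Python) =====
-- def projection(vector, orthanormalM):
--     # projection of vector onto the column space of orthanormalM:
--     # coefficients c_i = <vector, column_i>, result row r = sum_i M[r][i]*c_i
--     m = len(orthanormalM)
--     n = len(orthanormalM[0])
--     if m != len(vector):
--         raise Exception("Vector and span not in same space")
--     if len(vector[0]) != 1:
--         raise Exception("Not a vector")
--     c = [sum(vector[r][0] * orthanormalM[r][i] for r in range(m)) for i in range(n)]
--     return [[sum(orthanormalM[r][i] * c[i] for i in range(n))] for r in range(m)]
-- ===== Notes on version B (the rewrite author's own statement) =====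
-- stated objective: simpler
-- what changed: A loops over columns building full m×1 intermediate matrices (extract column, deep-copy scale, add); B validates the vector shape once up front, computes the coefficient list once, and fills each result row with a single accumulation. Pre_ excludes the inputs on which A raises, and additionally zero-column matrices paired with a vector whose first row is not of width 1: there A's skipping of all validation is an accident of its empty loop (it returns the zero vector without ever inspecting the vector) while B's up-front shape check raises.
-- outside the precondition, e.g. on projection([[1, 2]], [[]]): A returns [[0]], B raises Exception
import Mathlib
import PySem

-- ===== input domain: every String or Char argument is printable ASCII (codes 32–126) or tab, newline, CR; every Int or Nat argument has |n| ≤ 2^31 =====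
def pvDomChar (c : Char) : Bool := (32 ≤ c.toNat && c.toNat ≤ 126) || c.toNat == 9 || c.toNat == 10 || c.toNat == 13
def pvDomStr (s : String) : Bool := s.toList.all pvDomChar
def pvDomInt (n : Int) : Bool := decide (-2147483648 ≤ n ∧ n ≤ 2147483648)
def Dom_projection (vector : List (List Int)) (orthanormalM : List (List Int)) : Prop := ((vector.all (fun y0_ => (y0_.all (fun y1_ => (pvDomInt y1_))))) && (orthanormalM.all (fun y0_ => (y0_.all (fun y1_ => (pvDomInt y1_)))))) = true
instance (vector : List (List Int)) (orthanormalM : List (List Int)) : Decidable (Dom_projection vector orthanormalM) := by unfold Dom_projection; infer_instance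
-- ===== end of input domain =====

-- B replaces A's per-column pipeline of full m×1 intermediate matrices (extract column, scale, add)
-- by computing the coefficient list once and filling each result row in a single accumulation (objective: simpler).

-- ===== PORT A =====
-- Helpers of A. Python 'raise' branches have no value; on them the port returns a default
-- (0 / []) — all such inputs are excluded by Pre_projection, so the defaults are never claimed.
def dotProductA (v1 : List (List Int)) (v2 : List (List Int)) : Int :=
  let m1 := v1.length
  let n1 := (v1.headD []).length
  let m2 := v2.length
  let n2 := (v2.headD []).length
  if n1 ≠ 1 ∨ n2 ≠ 1 then 0            -- raise Exception("Not a vector")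
  else if m1 ≠ m2 then 0               -- raise Exception("Vectors must be same size to compute dot product")
  else (List.range m1).foldl (fun acc i => acc + (v1.getD i []).getD 0 0 * (v2.getD i []).getD 0 0) 0

def scaleVectorA (v : List (List Int)) (scaler : Int) : List (List Int) :=
  if (v.headD []).length ≠ 1 then []   -- raise Exception("Not a vector")
  else v.map (fun row => row.set 0 (row.getD 0 0 * scaler))   -- q[i][0] = q[i][0]*scaler

def addVectorsA (v1 : List (List Int)) (v2 : List (List Int)) : List (List Int) :=
  if (v1.headD []).length ≠ 1 ∨ (v2.headD []).length ≠ 1 then []   -- raise Exception("Not a vector")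
  else if v1.length ≠ v2.length then []                            -- raise Exception("Vectors must be same size to add")
  else (List.range v1.length).map (fun i => [(v1.getD i []).getD 0 0 + (v2.getD i []).getD 0 0])

def seperateColumnVectorA (M : List (List Int)) (columnIndex : Nat) : List (List Int) :=
  (List.range M.length).map (fun i => [(M.getD i []).getD columnIndex 0])

def projection (vector : List (List Int)) (orthanormalM : List (List Int)) : List (List Int) :=
  let m := orthanormalM.length
  let n := (orthanormalM.headD []).length    -- len(orthanormalM[0]): IndexError when empty, excluded by Pre_
  if m ≠ vector.length then []               -- raise Exception("Vector and span not in same space")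
  else
    (List.range n).foldl
      (fun p i =>
        let q := seperateColumnVectorA orthanormalM i
        addVectorsA p (scaleVectorA q (dotProductA vector q)))
      ((List.range m).map (fun _ => [(0 : Int)]))

-- ===== PORT B =====
def projection_alt (vector : List (List Int)) (orthanormalM : List (List Int)) : List (List Int) :=
  let m := orthanormalM.length
  let n := (orthanormalM.headD []).length
  if m ≠ vector.length then []               -- raise Exception("Vector and span not in same space")
  else if (vector.headD []).length ≠ 1 then []   -- raise Exception("Not a vector")
  else
    let c := (List.range n).map (fun i =>
      (List.range m).foldl (fun acc r => acc + (vector.getD r []).getD 0 0 * (orthanormalM.getD r []).getD i 0) 0)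
    (List.range m).map (fun r =>
      [(List.range n).foldl (fun acc i => acc + (orthanormalM.getD r []).getD i 0 * c.getD i 0) 0])

-- ===== PRECONDITION & SPEC =====
-- Pre_ excludes the inputs on which Python A raises: empty matrix (IndexError on
-- orthanormalM[0]), a matrix row shorter than row 0 (IndexError in seperateColumnVector),
-- size mismatch with vector, a vector whose first row is not of width 1 ("Not a vector"),
-- or (when there is a column) a vector with an empty row (IndexError in dotProduct);
-- it additionally excludes zero-column matrices paired with a vector whose first row is
-- not of width 1, where A's empty loop accidentally skips all validation and returns the
-- zero vector while B's up-front shape check raises.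
def Pre_projection (vector : List (List Int)) (orthanormalM : List (List Int)) : Prop :=
  orthanormalM ≠ [] ∧
  (∀ row ∈ orthanormalM, (orthanormalM.headD []).length ≤ row.length) ∧
  vector.length = orthanormalM.length ∧
  (vector.headD []).length = 1 ∧
  ((orthanormalM.headD []).length = 0 ∨ ∀ row ∈ vector, row ≠ [])
instance (vector : List (List Int)) (orthanormalM : List (List Int)) : Decidable (Pre_projection vector orthanormalM) := by unfold Pre_projection; infer_instance

def pvWitness_projection : List (List Int) × List (List Int) := ([[1], [2]], [[1, 0], [0, 1]])

def Spec_projection (vector : List (List Int)) (orthanormalM : List (List Int)) (out : List (List Int)) : Prop := out = projection_alt vector orthanormalM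
instance (vector : List (List Int)) (orthanormalM : List (List Int)) (out : List (List Int)) : Decidable (Spec_projection vector orthanormalM out) := by unfold Spec_projection; infer_instance

-- ===== CLAIM (what is proved, stated in full; the proofs are below) =====
def Claim_equal_projection : Prop := ∀ (vector : List (List Int)) (orthanormalM : List (List Int)), Dom_projection vector orthanormalM → Pre_projection vector orthanormalM → Spec_projection vector orthanormalM (projection vector orthanormalM)

-- ===== LEMMAS AND PROOFS =====

-- B's coefficient c_i = vector · (column i), as one fold
def pvC (vector M : List (List Int)) (i : Nat) : Int :=
  (List.range M.length).foldl (fun acc r => acc + (vector.getD r []).getD 0 0 * (M.getD r []).getD i 0) 0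

lemma headD_eq_getD_zero {α : Type} (l : List α) (d : α) : l.headD d = l.getD 0 d := by
  cases l <;> rfl

lemma sep_length (M : List (List Int)) (i : Nat) :
    (seperateColumnVectorA M i).length = M.length := by
  simp [seperateColumnVectorA]

lemma sep_getD (M : List (List Int)) (i r : Nat) (h : r < M.length) :
    (seperateColumnVectorA M i).getD r [] = [(M.getD r []).getD i 0] := by
  simp [seperateColumnVectorA, h]

lemma sep_headD (M : List (List Int)) (i : Nat) (h : 0 < M.length) :
    (seperateColumnVectorA M i).headD [] = [(M.getD 0 []).getD i 0] := by
  rw [headD_eq_getD_zero, sep_getD M i 0 h]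

lemma dot_eq (vector M : List (List Int)) (i : Nat)
    (hm : vector.length = M.length) (h0 : 0 < M.length)
    (hv : (vector.headD []).length = 1) :
    dotProductA vector (seperateColumnVectorA M i) = pvC vector M i := by
  unfold dotProductA pvC
  have hv' : (vector.head?.getD []).length = 1 := by cases vector <;> simp_all
  rw [sep_headD M i h0]
  rw [if_neg (by simp [hv'])]
  rw [if_neg (by simp [sep_length, hm])]
  rw [hm]
  refine PySem.List.foldl_congr_mem _ _ _ _ ?_
  intro acc r hr
  rw [sep_getD M i r (List.mem_range.mp hr)]
  rfl

-- A's loop after k iterations: row r holds the partial sum over the first k columns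
lemma loop_eq (vector M : List (List Int)) (k : Nat)
    (hm : vector.length = M.length) (h0 : 0 < M.length)
    (hv : (vector.headD []).length = 1) :
    (List.range k).foldl
      (fun p i =>
        let q := seperateColumnVectorA M i
        addVectorsA p (scaleVectorA q (dotProductA vector q)))
      ((List.range M.length).map (fun _ => [(0 : Int)]))
    = (List.range M.length).map (fun r =>
        [(List.range k).foldl (fun acc i => acc + (M.getD r []).getD i 0 * pvC vector M i) 0]) := by
  induction k with
  | zero => simp
  | succ k ih =>
    rw [List.range_succ, List.foldl_append, ih, List.foldl_cons, List.foldl_nil]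
    dsimp only
    rw [dot_eq vector M k hm h0 hv]
    have hscale : scaleVectorA (seperateColumnVectorA M k) (pvC vector M k)
        = (List.range M.length).map (fun r => [(M.getD r []).getD k 0 * pvC vector M k]) := by
      unfold scaleVectorA
      rw [sep_headD M k h0]
      simp [seperateColumnVectorA, List.set]
    rw [hscale]
    unfold addVectorsA
    rw [headD_eq_getD_zero, headD_eq_getD_zero,
      PySem.List.getD_map_range (h := h0), PySem.List.getD_map_range (h := h0)]
    simp only [List.length_cons, List.length_nil, ne_eq, List.length_map, List.length_range,
      not_true_eq_false, false_or, reduceIte]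
    refine List.map_congr_left ?_
    intro r hr
    have hrm : r < M.length := List.mem_range.mp hr
    rw [PySem.List.getD_map_range (h := hrm), PySem.List.getD_map_range (h := hrm)]
    simp [List.foldl_append]

lemma pvC_getD (vector M : List (List Int)) (n i : Nat) (hi : i < n) :
    (((List.range n).map (fun i =>
        (List.range M.length).foldl
          (fun acc r => acc + (vector.getD r []).getD 0 0 * (M.getD r []).getD i 0) 0)).getD i 0)
      = pvC vector M i := by
  rw [PySem.List.getD_map_range (h := hi)]
  rfl

-- ===== VERDICT (by name: the statement is the Claim_ definition above) =====
theorem projection_spec : Claim_equal_projection := by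
  intro vector M _ hpre
  obtain ⟨hne, _hrows, hlen, hv, hcol⟩ := hpre
  have h0 : 0 < M.length := List.length_pos_iff.mpr hne
  unfold Spec_projection projection projection_alt
  rw [if_neg (by omega), if_neg (by omega), if_neg (by cases vector <;> simp_all)]
  rcases hcol with hn0 | _
  · -- no columns: both are the zero vector
    rw [hn0]
    simp
  · rw [loop_eq vector M _ hlen h0 hv]
    refine List.map_congr_left ?_
    intro r _
    congr 1
    refine PySem.List.foldl_congr_mem _ _ _ _ ?_
    intro acc i hi
    rw [pvC_getD vector M _ i (List.mem_range.mp hi)]
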